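-- pv_equiv track=rewrite | github.com/rewonderful/MLC | src/jingdong/jd1.py | solution
-- ===== SOURCE A (Python) =====
-- def solution( board):
--     """
--     :type board: List[List[int]]
--     :rtype: List[List[int]]
--     """
--     R,C = 5,5
--     def dfs(i,j,curr):
--         if i >= 0 and i < 5 and j >=0 and j<5 and board[i][j] == curr:
--             board[i][j] = 0
--             dfs(i,j+1,curr)
--             dfs(i,j-1,curr)
--             dfs(i+1,j,curr)
--             dfs(i-1,j,curr)
--             """
--             for c in range(C):
--             i = R - 1
--             for r in reversed(range(R)):
--                 if board[r][c] > 0: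
--                     board[i][c] = board[r][c]
--                     i -= 1
--             for r in reversed(range(i + 1)):
--                 board[r][c] = 0
--
--             """
--     def clean(board):
--         for col in range(C):
--             for row in range(R-1,-1,-1):
--                 if board[row][col] == 0:
--                     i = row - 1
--                     while i > 0 and board[i][col] == 0:
--                         i -= 1
--                     if i >= 0:
--                         board[row][col],board[i][col] = board[i][col],board[row][col]
--
--     changed = True
--     while changed:
--         changed = False
--
--         for i in range(R):
--             for j in range(C - 2):
--                 if board[i][j] != 0 and board[i][j] == board[i][j + 1] == board[i][j + 2] and not changed:
--                     dfs(i,j,board[i][j])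
--                     changed = True
--
--         for i in range(R-2):
--             for j in range(C):
--                 if board[i][j] != 0 and board[i][j] == board[i+1][j] == board[i+2][j] and not changed:
--                     dfs(i, j, board[i][j])
--                     changed = True
--
--         clean(board)
--     ans = 0
--     for i in range(R):
--         for j in range(C):
--             if board[i][j] > 0:
--                 ans += 1
--
--     return ans
-- ===== SOURCE B (Python) =====
-- def solution(board):
--     """Iterative re-implementation: explicit-stack flood fill instead of recursion,
--     early-return search for the first run-of-3 instead of guarded full scans.
--     (Like the original, mutates `board` in place; the equivalence claimed is about the return value.)"""
--     R, C = 5, 5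
--
--     def find_triple():
--         for i in range(R):
--             for j in range(C - 2):
--                 v = board[i][j]
--                 if v != 0 and v == board[i][j + 1] == board[i][j + 2]:
--                     return i, j, v
--         for i in range(R - 2):
--             for j in range(C):
--                 v = board[i][j]
--                 if v != 0 and v == board[i + 1][j] == board[i + 2][j]:
--                     return i, j, v
--         return None
--
--     def gravity():
--         for col in range(C):
--             for row in range(R - 1, -1, -1):
--                 if board[row][col] == 0:
--                     i = row - 1
--                     while i > 0 and board[i][col] == 0:
--                         i -= 1
--                     if i >= 0:
--                         board[row][col], board[i][col] = board[i][col], board[row][col]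
--
--     while True:
--         t = find_triple()
--         if t is None:
--             break
--         si, sj, v = t
--         stack = [(si, sj)]
--         while stack:
--             a, b = stack.pop()
--             if 0 <= a < R and 0 <= b < C and board[a][b] == v:
--                 board[a][b] = 0
--                 stack += [(a - 1, b), (a + 1, b), (a, b - 1), (a, b + 1)]
--         gravity()
--
--     return sum(1 for row in board for x in row if x > 0)
-- ===== Notes on version B (the rewrite author's own statement) =====
-- stated objective: alternative
-- what changed: The recursive flood fill is replaced by an explicit-stack iterative one and the two guarded full-board scans (which can only ever fire on the first triple per round, via the `not changed` flag) by an early-return search for the first run of three; the final count is a single generator sum instead of nested index loops.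
import Mathlib
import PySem

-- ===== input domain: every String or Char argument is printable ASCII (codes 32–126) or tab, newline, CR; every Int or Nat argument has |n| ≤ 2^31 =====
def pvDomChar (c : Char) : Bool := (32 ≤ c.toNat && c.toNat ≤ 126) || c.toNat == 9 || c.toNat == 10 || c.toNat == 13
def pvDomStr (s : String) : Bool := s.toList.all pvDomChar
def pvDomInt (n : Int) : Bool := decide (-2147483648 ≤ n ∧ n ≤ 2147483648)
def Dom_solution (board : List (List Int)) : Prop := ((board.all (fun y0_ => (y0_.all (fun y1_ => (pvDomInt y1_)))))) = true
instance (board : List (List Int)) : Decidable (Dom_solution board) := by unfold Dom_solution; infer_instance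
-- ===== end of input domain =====

-- B replaces A's recursive flood fill by an explicit-stack one and the guarded full board scans by an
-- early-return search for the first run of three; both Pythons mutate `board` in place (A additionally runs
-- one final gravity pass), so the equivalence proved here is about the RETURN value only.

-- ===== PORT A =====
-- board[i][j] / board[i][j] = v: every read/write in both programs is guarded to 0 ≤ i,j < 5 and Pre_
-- demands a 5×5 board, so plain getD/set with toNat is exact there.
def getC (b : List (List Int)) (i j : Int) : Int := (b.getD i.toNat []).getD j.toNat 0

def setC (b : List (List Int)) (i j : Int) (v : Int) : List (List Int) :=
  b.modify i.toNat (fun r => r.set j.toNat v)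

-- A's recursive dfs.  Fuel makes it total: dfs is only invoked (under the guard) with curr ≠ 0, every
-- recursive step first zeroes a cell equal to curr, so at most 25 guarded calls ever happen and the call
-- depth is at most 27; fuel 30 is never exhausted on the inputs the claim covers.
def dfsA : Nat → List (List Int) → Int → Int → Int → List (List Int)
  | 0, b, _, _, _ => b
  | f + 1, b, i, j, c =>
    if 0 ≤ i ∧ i < 5 ∧ 0 ≤ j ∧ j < 5 ∧ getC b i j = c then
      let b0 := setC b i j 0
      let b1 := dfsA f b0 i (j + 1) c
      let b2 := dfsA f b1 i (j - 1) c
      let b3 := dfsA f b2 (i + 1) j c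
      dfsA f b3 (i - 1) j c
    else b

-- the inner `while i > 0 and board[i][col] == 0: i -= 1` of clean
def wI (b : List (List Int)) (col : Int) (i : Int) : Int :=
  if h : 0 < i ∧ getC b i col = 0 then wI b col (i - 1) else i
  termination_by i.toNat
  decreasing_by omega

-- body of clean's row loop (the swap is Python's tuple swap: both right-hand sides read first)
def cleanCell (b : List (List Int)) (row col : Int) : List (List Int) :=
  if getC b row col = 0 then
    let i := wI b col (row - 1)
    if 0 ≤ i then
      let vi := getC b i col
      let vr := getC b row col
      setC (setC b row col vi) i col vr
    else b
  else b

def cleanA (b : List (List Int)) : List (List Int) :=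
  (PySem.List.pyRange 0 5 1).foldl (fun bb col =>
    (PySem.List.pyRange 4 (-1) (-1)).foldl (fun bc row => cleanCell bc row col) bb) b

-- board[i][j] != 0 and board[i][j] == board[i][j+1] == board[i][j+2]
def tripH (b : List (List Int)) (i j : Int) : Bool :=
  decide (getC b i j ≠ 0 ∧ getC b i j = getC b i (j + 1) ∧ getC b i (j + 1) = getC b i (j + 2))

def tripV (b : List (List Int)) (i j : Int) : Bool :=
  decide (getC b i j ≠ 0 ∧ getC b i j = getC b (i + 1) j ∧ getC b (i + 1) j = getC b (i + 2) j)

-- the two scan loops of A, threading (board, changed)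
def scanH (st : List (List Int) × Bool) : List (List Int) × Bool :=
  (PySem.List.pyRange 0 5 1).foldl (fun s i =>
    (PySem.List.pyRange 0 3 1).foldl (fun s2 j =>
      if tripH s2.1 i j && !s2.2 then (dfsA 30 s2.1 i j (getC s2.1 i j), true) else s2) s) st

def scanV (st : List (List Int) × Bool) : List (List Int) × Bool :=
  (PySem.List.pyRange 0 3 1).foldl (fun s i =>
    (PySem.List.pyRange 0 5 1).foldl (fun s2 j =>
      if tripV s2.1 i j && !s2.2 then (dfsA 30 s2.1 i j (getC s2.1 i j), true) else s2) s) st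

-- the `while changed` loop; every iteration with changed=True zeroes at least 3 of the ≤ 25 nonzero
-- cells and clean only permutes values, so at most 9 iterations ever run; fuel 32 is never exhausted.
def loopA : Nat → List (List Int) → List (List Int)
  | 0, b => b
  | f + 1, b =>
    let s1 := scanH (b, false)
    let s2 := scanV s1
    let b3 := cleanA s2.1
    if s2.2 then loopA f b3 else b3

def countA (b : List (List Int)) : Int :=
  (PySem.List.pyRange 0 5 1).foldl (fun a i =>
    (PySem.List.pyRange 0 5 1).foldl (fun a2 j =>
      if getC b i j > 0 then a2 + 1 else a2) a) 0

def solution (board : List (List Int)) : Int := countA (loopA 32 board)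

-- ===== PORT B =====
def pairsH : List (Int × Int) :=
  (PySem.List.pyRange 0 5 1).flatMap (fun i => (PySem.List.pyRange 0 3 1).map (fun j => (i, j)))

def pairsV : List (Int × Int) :=
  (PySem.List.pyRange 0 3 1).flatMap (fun i => (PySem.List.pyRange 0 5 1).map (fun j => (i, j)))

-- Source B's find_triple: the early-return double loop is List.find? over the scanned index pairs
def findTriple (b : List (List Int)) : Option (Int × Int × Int) :=
  match pairsH.find? (fun p => tripH b p.1 p.2) with
  | some p => some (p.1, p.2, getC b p.1 p.2)
  | none =>
    match pairsV.find? (fun p => tripV b p.1 p.2) with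
    | some p => some (p.1, p.2, getC b p.1 p.2)
    | none => none

-- Source B's `while stack:` flood fill; head of the list = top of the stack (Python pushes the four
-- neighbours in the reverse of this order and pops from the end).  Total pops are bounded by
-- 1 + 4·25 = 101 pushes, so fuel 128 is never exhausted on the inputs the claim covers.
def floodB : Nat → List (List Int) → List (Int × Int) → Int → List (List Int)
  | 0, b, _, _ => b
  | _ + 1, b, [], _ => b
  | f + 1, b, (i, j) :: st, c =>
    if 0 ≤ i ∧ i < 5 ∧ 0 ≤ j ∧ j < 5 ∧ getC b i j = c then
      floodB f (setC b i j 0) ((i, j + 1) :: (i, j - 1) :: (i + 1, j) :: (i - 1, j) :: st) c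
    else floodB f b st c

-- Source B's gravity() is textually A's clean; the port reuses the same helper (cleanA)
def loopB : Nat → List (List Int) → List (List Int)
  | 0, b => b
  | f + 1, b =>
    match findTriple b with
    | none => b
    | some (i, j, v) => loopB f (cleanA (floodB 128 b [(i, j)] v))

-- sum(1 for row in board for x in row if x > 0)
def countB (b : List (List Int)) : Nat := (b.map (fun r => r.countP (fun x => decide (0 < x)))).sum

def solution_alt (board : List (List Int)) : Int := (countB (loopB 32 board) : Int)

-- ===== PRECONDITION & SPEC =====
-- Pre_ = the fixed 5×5 boards of the puzzle.  A also happens to return on boards with extra rows or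
-- longer rows (it silently ignores the cells beyond the 5×5 grid, B counts them); those are excluded.
def Pre_solution (board : List (List Int)) : Prop :=
  board.length = 5 ∧ ∀ r ∈ board, r.length = 5
instance (board : List (List Int)) : Decidable (Pre_solution board) := by
  unfold Pre_solution; infer_instance

def pvWitness_solution : List (List Int) :=
  [[1, 1, 1, 2, 2], [3, 4, 5, 6, 7], [1, 2, 3, 4, 5], [5, 4, 3, 2, 1], [1, 1, 2, 2, 3]]

def Spec_solution (board : List (List Int)) (out : Int) : Prop := out = solution_alt board
instance (board : List (List Int)) (out : Int) : Decidable (Spec_solution board out) := by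
  unfold Spec_solution; infer_instance

-- ===== CLAIM (what is proved, stated in full; the proofs are below) =====
def Claim_equal_solution : Prop :=
  ∀ (board : List (List Int)), Dom_solution board → Pre_solution board →
    Spec_solution board (solution board)

-- ===== LEMMAS AND PROOFS =====

-- number of grid cells holding value c (used as the flood-fill measure; on 5×5 boards it is the
-- count over the whole board)
def mC (b : List (List Int)) (c : Int) : Nat := (b.map (fun r => r.countP (fun x => decide (x = c)))).sum

-- number of positive cells, in B's shape
def posC (b : List (List Int)) : Nat := countB b

theorem shape_setC (b : List (List Int)) (i j v : Int) (h : Pre_solution b)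
    (hi : 0 ≤ i ∧ i < 5) (hj : 0 ≤ j ∧ j < 5) : Pre_solution (setC b i j v) := by
  obtain ⟨hl, hr⟩ := h
  have hin : i.toNat < b.length := by omega
  refine ⟨by simp [setC, List.length_modify, hl], ?_⟩
  intro r hrm
  rw [setC, List.modify_eq_set] at hrm
  rcases List.mem_or_eq_of_mem_set hrm with h1 | h1
  · exact hr r h1
  · subst h1
    rw [List.length_set]
    have : b[i.toNat]? = some b[i.toNat] := List.getElem?_eq_getElem hin
    simp [this]
    exact hr _ (List.getElem_mem hin)

theorem getC_setC_self (b : List (List Int)) (i j v : Int) (h : Pre_solution b)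
    (hi : 0 ≤ i ∧ i < 5) (hj : 0 ≤ j ∧ j < 5) : getC (setC b i j v) i j = v := by
  obtain ⟨hl, hr⟩ := h
  have hin : i.toNat < b.length := by omega
  have hrow : b[i.toNat]? = some b[i.toNat] := List.getElem?_eq_getElem hin
  have hrl : b[i.toNat].length = 5 := hr _ (List.getElem_mem hin)
  have hjn : j.toNat < b[i.toNat].length := by omega
  simp [getC, setC, List.getD_eq_getElem?_getD, List.getElem?_modify_eq, hrow,
    List.getElem?_set_self hjn]

theorem getC_setC_ne (b : List (List Int)) (i j i' j' v : Int)
    (hi : 0 ≤ i) (hi' : 0 ≤ i') (hj : 0 ≤ j) (hj' : 0 ≤ j')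
    (hne : i ≠ i' ∨ j ≠ j') : getC (setC b i j v) i' j' = getC b i' j' := by
  rcases hne with hne | hne
  · have : i.toNat ≠ i'.toNat := by omega
    simp [getC, setC, List.getD_eq_getElem?_getD, List.getElem?_modify_ne _ _ this]
  · by_cases hii : i.toNat = i'.toNat
    · have hjj : j.toNat ≠ j'.toNat := by omega
      simp only [getC, setC, List.getD_eq_getElem?_getD, hii, List.getElem?_modify_eq]
      cases hb : b[i'.toNat]? with
      | none => simp
      | some r => simp [List.getElem?_set_ne hjj]
    · simp [getC, setC, List.getD_eq_getElem?_getD, List.getElem?_modify_ne _ _ hii]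

theorem countP_set (r : List Int) (m : Nat) (v : Int) (p : Int → Bool) (h : m < r.length) :
    (r.set m v).countP p + (if p (r.getD m 0) then 1 else 0)
      = r.countP p + (if p v then 1 else 0) := by
  induction r generalizing m with
  | nil => simp at h
  | cons x xs ih =>
    cases m with
    | zero => simp [List.countP_cons]; split_ifs <;> omega
    | succ m =>
      have := ih m (by simpa using h)
      simp only [List.set_cons_succ, List.countP_cons, List.getD_cons_succ]
      split_ifs at this ⊢ <;> omega

theorem sum_map_modify (b : List (List Int)) (n : Nat) (g : List Int → List Int)
    (f : List Int → Nat) (h : n < b.length) :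
    ((b.modify n g).map f).sum + f (b.getD n []) = (b.map f).sum + f (g (b.getD n [])) := by
  induction b generalizing n with
  | nil => simp at h
  | cons x xs ih =>
    cases n with
    | zero => simp [List.modify_zero_cons]; omega
    | succ n =>
      have := ih n (by simpa using h)
      simp only [List.modify_succ_cons, List.map_cons, List.sum_cons, List.getD_cons_succ]
      omega

theorem cnt_setC (b : List (List Int)) (i j v : Int) (p : Int → Bool) (h : Pre_solution b)
    (hi : 0 ≤ i ∧ i < 5) (hj : 0 ≤ j ∧ j < 5) :
    ((setC b i j v).map (fun r => r.countP p)).sum + (if p (getC b i j) then 1 else 0)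
      = (b.map (fun r => r.countP p)).sum + (if p v then 1 else 0) := by
  obtain ⟨hl, hr⟩ := h
  have hin : i.toNat < b.length := by omega
  have hrl : (b.getD i.toNat []).length = 5 := by
    rw [List.getD_eq_getElem?_getD, List.getElem?_eq_getElem hin]
    exact hr _ (List.getElem_mem hin)
  have hjn : j.toNat < (b.getD i.toNat []).length := by omega
  have h1 := sum_map_modify b i.toNat (fun r => r.set j.toNat v) (fun r => r.countP p) hin
  have h2 := countP_set (b.getD i.toNat []) j.toNat v p hjn
  simp only [setC, getC] at *
  split_ifs at * <;> omega

theorem mC_setC (b : List (List Int)) (i j v c : Int) (h : Pre_solution b)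
    (hi : 0 ≤ i ∧ i < 5) (hj : 0 ≤ j ∧ j < 5) :
    mC (setC b i j v) c + (if getC b i j = c then 1 else 0)
      = mC b c + (if v = c then 1 else 0) := by
  have := cnt_setC b i j v (fun x => decide (x = c)) h hi hj
  simpa [mC] using this

theorem posC_setC (b : List (List Int)) (i j v : Int) (h : Pre_solution b)
    (hi : 0 ≤ i ∧ i < 5) (hj : 0 ≤ j ∧ j < 5) :
    posC (setC b i j v) + (if 0 < getC b i j then 1 else 0)
      = posC b + (if 0 < v then 1 else 0) := by
  have := cnt_setC b i j v (fun x => decide (0 < x)) h hi hj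
  simpa [posC, countB] using this

theorem sum_countP_le (L : List (List Int)) (p : Int → Bool) (h : ∀ r ∈ L, r.length = 5) :
    (L.map (fun r => r.countP p)).sum ≤ 5 * L.length := by
  induction L with
  | nil => simp
  | cons x xs ih =>
    have hx : x.countP p ≤ 5 := by
      have := List.countP_le_length (p := p) (l := x)
      have := h x (by simp)
      omega
    have := ih (fun r hr => h r (by simp [hr]))
    simp only [List.map_cons, List.sum_cons, List.length_cons]
    omega

theorem mC_le_25 (b : List (List Int)) (c : Int) (h : Pre_solution b) : mC b c ≤ 25 := by
  have := sum_countP_le b (fun x => decide (x = c)) h.2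
  rw [h.1] at this
  simpa [mC] using this

theorem mC_clear (b : List (List Int)) (i j c : Int) (h : Pre_solution b) (hc : c ≠ 0)
    (hi : 0 ≤ i ∧ i < 5) (hj : 0 ≤ j ∧ j < 5) (hv : getC b i j = c) :
    mC (setC b i j 0) c + 1 = mC b c := by
  have := mC_setC b i j 0 c h hi hj
  rw [if_pos hv, if_neg (by omega)] at this
  omega

theorem shape_dfsA (f : Nat) (b : List (List Int)) (i j c : Int) (h : Pre_solution b) :
    Pre_solution (dfsA f b i j c) := by
  induction f generalizing b i j with
  | zero => exact h
  | succ f ih =>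
    simp only [dfsA]
    split
    · next hg =>
      exact ih _ _ _ (ih _ _ _ (ih _ _ _ (ih _ _ _
        (shape_setC b i j 0 h ⟨hg.1, hg.2.1⟩ ⟨hg.2.2.1, hg.2.2.2.1⟩))))
    · exact h

theorem mC_dfsA_le (f : Nat) (b : List (List Int)) (i j c : Int) (h : Pre_solution b) (hc : c ≠ 0) :
    mC (dfsA f b i j c) c ≤ mC b c := by
  induction f generalizing b i j with
  | zero => exact le_refl _
  | succ f ih =>
    simp only [dfsA]
    split
    · next hg =>
      have hs0 := shape_setC b i j 0 h ⟨hg.1, hg.2.1⟩ ⟨hg.2.2.1, hg.2.2.2.1⟩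
      have hm0 := mC_clear b i j c h hc ⟨hg.1, hg.2.1⟩ ⟨hg.2.2.1, hg.2.2.2.1⟩ hg.2.2.2.2
      have hs1 := shape_dfsA f _ i (j + 1) c hs0
      have hs2 := shape_dfsA f _ i (j - 1) c hs1
      have hs3 := shape_dfsA f _ (i + 1) j c hs2
      have h1 := ih _ i (j + 1) hs0
      have h2 := ih _ i (j - 1) hs1
      have h3 := ih _ (i + 1) j hs2
      have h4 := ih _ (i - 1) j hs3
      omega
    · exact le_refl _

theorem floodB_nil (g : Nat) (b : List (List Int)) (c : Int) : floodB g b [] c = b := by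
  cases g <;> rfl

-- flood-fill fuel irrelevance: any fuel beyond the pop bound gives the same board
theorem floodB_fuel_aux (N : Nat) : ∀ (g g' : Nat) (b : List (List Int)) (st : List (Int × Int))
    (c : Int), Pre_solution b → c ≠ 0 → st.length + 4 * mC b c ≤ N →
    st.length + 4 * mC b c < g → st.length + 4 * mC b c < g' →
    floodB g b st c = floodB g' b st c := by
  induction N with
  | zero =>
    intro g g' b st c h hc hN hg hg'
    match st with
    | [] => rw [floodB_nil, floodB_nil]
    | _ :: _ => simp at hN
  | succ N ih =>
    intro g g' b st c h hc hN hg hg'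
    match st with
    | [] => rw [floodB_nil, floodB_nil]
    | (i, j) :: st =>
      match g, g' with
      | g + 1, g' + 1 =>
        simp only [floodB]
        by_cases hgd : 0 ≤ i ∧ i < 5 ∧ 0 ≤ j ∧ j < 5 ∧ getC b i j = c
        · rw [if_pos hgd, if_pos hgd]
          have hs0 := shape_setC b i j 0 h ⟨hgd.1, hgd.2.1⟩ ⟨hgd.2.2.1, hgd.2.2.2.1⟩
          have hm0 := mC_clear b i j c h hc ⟨hgd.1, hgd.2.1⟩ ⟨hgd.2.2.1, hgd.2.2.2.1⟩ hgd.2.2.2.2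
          apply ih _ _ _ _ _ hs0 hc <;> simp only [List.length_cons] at * <;> omega
        · rw [if_neg hgd, if_neg hgd]
          apply ih _ _ _ _ _ h hc <;> simp only [List.length_cons] at * <;> omega

theorem floodB_fuel (g g' : Nat) (b : List (List Int)) (st : List (Int × Int)) (c : Int)
    (h : Pre_solution b) (hc : c ≠ 0)
    (hg : st.length + 4 * mC b c < g) (hg' : st.length + 4 * mC b c < g') :
    floodB g b st c = floodB g' b st c :=
  floodB_fuel_aux (st.length + 4 * mC b c) g g' b st c h hc (le_refl _) hg hg' 

-- the stack flood fill pops the frame (i,j) exactly as the recursion dfsA processes it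
theorem floodB_dfsA (f g : Nat) (b : List (List Int)) (i j c : Int) (st : List (Int × Int))
    (h : Pre_solution b) (hc : c ≠ 0) (hf : mC b c < f)
    (hg : st.length + 1 + 4 * mC b c < g) :
    floodB g b ((i, j) :: st) c = floodB (g - 1) (dfsA f b i j c) st c := by
  induction f generalizing b i j st g with
  | zero => omega
  | succ f ih =>
    match g, hg with
    | g + 1, hg =>
      simp only [floodB, dfsA, Nat.add_sub_cancel]
      by_cases hgd : 0 ≤ i ∧ i < 5 ∧ 0 ≤ j ∧ j < 5 ∧ getC b i j = c
      · rw [if_pos hgd, if_pos hgd]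
        have hs0 := shape_setC b i j 0 h ⟨hgd.1, hgd.2.1⟩ ⟨hgd.2.2.1, hgd.2.2.2.1⟩
        have hm0 := mC_clear b i j c h hc ⟨hgd.1, hgd.2.1⟩ ⟨hgd.2.2.1, hgd.2.2.2.1⟩ hgd.2.2.2.2
        set b0 := setC b i j 0 with hb0
        set b1 := dfsA f b0 i (j + 1) c with hb1
        set b2 := dfsA f b1 i (j - 1) c with hb2
        set b3 := dfsA f b2 (i + 1) j c with hb3
        have hs1 : Pre_solution b1 := shape_dfsA f b0 i (j + 1) c hs0
        have hs2 : Pre_solution b2 := shape_dfsA f b1 i (j - 1) c hs1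
        have hs3 : Pre_solution b3 := shape_dfsA f b2 (i + 1) j c hs2
        have hm1 : mC b1 c ≤ mC b0 c := mC_dfsA_le f b0 i (j + 1) c hs0 hc
        have hm2 : mC b2 c ≤ mC b1 c := mC_dfsA_le f b1 i (j - 1) c hs1 hc
        have hm3 : mC b3 c ≤ mC b2 c := mC_dfsA_le f b2 (i + 1) j c hs2 hc
        have hm4 : mC (dfsA f b3 (i - 1) j c) c ≤ mC b3 c := mC_dfsA_le f b3 (i - 1) j c hs3 hc
        rw [ih g b0 i (j + 1) ((i, j - 1) :: (i + 1, j) :: (i - 1, j) :: st) hs0 (by omega)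
              (by simp only [List.length_cons]; omega)]
        rw [ih (g - 1) b1 i (j - 1) ((i + 1, j) :: (i - 1, j) :: st) hs1 (by omega)
              (by simp only [List.length_cons]; omega)]
        rw [ih (g - 1 - 1) b2 (i + 1) j ((i - 1, j) :: st) hs2 (by omega)
              (by simp only [List.length_cons]; omega)]
        rw [ih (g - 1 - 1 - 1) b3 (i - 1) j st hs3 (by omega) (by omega)]
        exact floodB_fuel _ _ _ _ _ (shape_dfsA f b3 (i - 1) j c hs3) hc (by omega) (by omega)
      · rw [if_neg hgd, if_neg hgd]

theorem floodB_eq_dfsA (b : List (List Int)) (i j c : Int) (h : Pre_solution b) (hc : c ≠ 0) :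
    floodB 128 b [(i, j)] c = dfsA 30 b i j c := by
  have hm := mC_le_25 b c h
  rw [floodB_dfsA 30 128 b i j c [] h hc (by omega) (by simp; omega)]
  exact floodB_nil _ _ _

-- ===== the guarded scans fire exactly on the first triple =====

theorem foldl_fire_true (trip : List (List Int) → Int × Int → Bool)
    (ps : List (Int × Int)) (b : List (List Int)) :
    ps.foldl (fun s2 p =>
      if trip s2.1 p && !s2.2 then (dfsA 30 s2.1 p.1 p.2 (getC s2.1 p.1 p.2), true) else s2)
      (b, true) = (b, true) := by
  induction ps with
  | nil => rfl
  | cons p ps ih => simpa using ih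

theorem foldl_fire (trip : List (List Int) → Int × Int → Bool)
    (ps : List (Int × Int)) (b : List (List Int)) :
    ps.foldl (fun s2 p =>
      if trip s2.1 p && !s2.2 then (dfsA 30 s2.1 p.1 p.2 (getC s2.1 p.1 p.2), true) else s2)
      (b, false)
    = match ps.find? (fun p => trip b p) with
      | none => (b, false)
      | some p => (dfsA 30 b p.1 p.2 (getC b p.1 p.2), true) := by
  induction ps with
  | nil => rfl
  | cons p ps ih =>
    simp only [List.foldl_cons, List.find?_cons]
    cases hp : trip b p with
    | true =>
      simp only [Bool.not_false, Bool.and_self, if_pos]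
      exact foldl_fire_true trip ps _
    | false =>
      simp only [Bool.false_and, Bool.false_eq_true, if_false]
      exact ih

theorem scanH_eq (b : List (List Int)) :
    scanH (b, false)
    = match pairsH.find? (fun p => tripH b p.1 p.2) with
      | none => (b, false)
      | some p => (dfsA 30 b p.1 p.2 (getC b p.1 p.2), true) := by
  have h1 : scanH (b, false) = pairsH.foldl (fun s2 p =>
      if tripH s2.1 p.1 p.2 && !s2.2 then (dfsA 30 s2.1 p.1 p.2 (getC s2.1 p.1 p.2), true) else s2)
      (b, false) := by
    rw [pairsH, List.foldl_flatMap]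
    simp only [List.foldl_map]
    rfl
  rw [h1]
  exact foldl_fire (fun bb p => tripH bb p.1 p.2) pairsH b

theorem scanV_eq (b : List (List Int)) :
    scanV (b, false)
    = match pairsV.find? (fun p => tripV b p.1 p.2) with
      | none => (b, false)
      | some p => (dfsA 30 b p.1 p.2 (getC b p.1 p.2), true) := by
  have h1 : scanV (b, false) = pairsV.foldl (fun s2 p =>
      if tripV s2.1 p.1 p.2 && !s2.2 then (dfsA 30 s2.1 p.1 p.2 (getC s2.1 p.1 p.2), true) else s2)
      (b, false) := by
    rw [pairsV, List.foldl_flatMap]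
    simp only [List.foldl_map]
    rfl
  rw [h1]
  exact foldl_fire (fun bb p => tripV bb p.1 p.2) pairsV b

theorem scanV_true (b : List (List Int)) : scanV (b, true) = (b, true) := by
  have h1 : scanV (b, true) = pairsV.foldl (fun s2 p =>
      if tripV s2.1 p.1 p.2 && !s2.2 then (dfsA 30 s2.1 p.1 p.2 (getC s2.1 p.1 p.2), true) else s2)
      (b, true) := by
    rw [pairsV, List.foldl_flatMap]
    simp only [List.foldl_map]
    rfl
  rw [h1]
  exact foldl_fire_true (fun bb p => tripV bb p.1 p.2) pairsV b

-- ===== clean: shape and positive count are preserved =====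

theorem wI_le (b : List (List Int)) (col i : Int) : wI b col i ≤ i :=
  wI.induct b col (fun i => wI b col i ≤ i)
    (fun x h ih => by simp only at ih ⊢; rw [wI.eq_def, dif_pos h]; omega)
    (fun x h => by simp only; rw [wI.eq_def, dif_neg h]) i

theorem shape_cleanCell (b : List (List Int)) (row col : Int) (h : Pre_solution b)
    (hrow : 0 ≤ row ∧ row < 5) (hcol : 0 ≤ col ∧ col < 5) :
    Pre_solution (cleanCell b row col) := by
  have hle := wI_le b col (row - 1)
  simp only [cleanCell]
  split
  · split
    · next hge =>
      exact shape_setC _ _ _ _ (shape_setC _ _ _ _ h hrow hcol) ⟨hge, by omega⟩ hcol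
    · exact h
  · exact h

theorem posC_cleanCell (b : List (List Int)) (row col : Int) (h : Pre_solution b)
    (hrow : 0 ≤ row ∧ row < 5) (hcol : 0 ≤ col ∧ col < 5) :
    posC (cleanCell b row col) = posC b := by
  have hle := wI_le b col (row - 1)
  simp only [cleanCell]
  split
  · next hz =>
    split
    · next hge =>
      have hir : 0 ≤ wI b col (row - 1) ∧ wI b col (row - 1) < 5 := ⟨hge, by omega⟩
      have hs1 := shape_setC b row col (getC b (wI b col (row - 1)) col) h hrow hcol
      have e1 := posC_setC b row col (getC b (wI b col (row - 1)) col) h hrow hcol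
      rw [hz] at e1
      norm_num at e1
      have hread : getC (setC b row col (getC b (wI b col (row - 1)) col)) (wI b col (row - 1)) col
          = getC b (wI b col (row - 1)) col := by
        by_cases hir2 : wI b col (row - 1) = row
        · rw [hir2]
          rw [hir2] at hir
          exact getC_setC_self b row col _ h hrow hcol
        · exact getC_setC_ne b row col _ col _ hrow.1 hir.1 hcol.1 hcol.1 (Or.inl (fun hh => hir2 hh.symm))
      have e2 := posC_setC _ (wI b col (row - 1)) col (getC b row col) hs1 hir hcol
      rw [hread] at e2
      rw [hz] at e2
      norm_num at e2
      rw [hz]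
      omega
    · rfl
  · rfl

theorem foldl_inv {α : Type} (P : List (List Int) → Prop) (g : List (List Int) → α → List (List Int))
    (l : List α) (hstep : ∀ bb x, x ∈ l → P bb → P (g bb x)) :
    ∀ bb, P bb → P (l.foldl g bb) := by
  induction l with
  | nil => intro bb hb; exact hb
  | cons x xs ih =>
    intro bb hb
    exact ih (fun b2 y hy => hstep b2 y (by simp [hy])) _ (hstep bb x (by simp) hb)

theorem shape_posC_cleanA (b : List (List Int)) (h : Pre_solution b) :
    Pre_solution (cleanA b) ∧ posC (cleanA b) = posC b := by
  rw [cleanA, show PySem.List.pyRange 0 5 1 = ([0, 1, 2, 3, 4] : List Int) from by decide,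
    show PySem.List.pyRange 4 (-1) (-1) = ([4, 3, 2, 1, 0] : List Int) from by decide]
  refine foldl_inv (fun bb => Pre_solution bb ∧ posC bb = posC b) _ _ ?_ b ⟨h, rfl⟩
  intro bb col hcol hP
  have hcol5 : 0 ≤ col ∧ col < 5 := by
    simp only [List.mem_cons, List.not_mem_nil, or_false] at hcol
    rcases hcol with h1 | h1 | h1 | h1 | h1 <;> subst h1 <;> norm_num
  refine foldl_inv (fun bb => Pre_solution bb ∧ posC bb = posC b) _ _ ?_ bb hP
  intro bc row hrow hQ
  have hrow5 : 0 ≤ row ∧ row < 5 := by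
    simp only [List.mem_cons, List.not_mem_nil, or_false] at hrow
    rcases hrow with h1 | h1 | h1 | h1 | h1 <;> subst h1 <;> norm_num
  exact ⟨shape_cleanCell bc row col hQ.1 hrow5 hcol5,
    (posC_cleanCell bc row col hQ.1 hrow5 hcol5).trans hQ.2⟩

-- ===== the two counts agree on 5×5 boards =====

theorem row_count (r : List Int) (hr : r.length = 5) (a : Int) :
    (PySem.List.pyRange 0 5 1).foldl (fun a2 j => if (r.getD j.toNat 0) > 0 then a2 + 1 else a2) a
      = a + (r.countP (fun x => decide (0 < x)) : Int) := by
  rw [show PySem.List.pyRange 0 5 1 = ([0, 1, 2, 3, 4] : List Int) from by decide]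
  match r, hr with
  | [x0, x1, x2, x3, x4], _ =>
    simp only [List.foldl_cons, List.foldl_nil, List.countP_cons, List.countP_nil,
      show ((0 : Int)).toNat = 0 from rfl, show ((1 : Int)).toNat = 1 from rfl,
      show ((2 : Int)).toNat = 2 from rfl, show ((3 : Int)).toNat = 3 from rfl,
      show ((4 : Int)).toNat = 4 from rfl,
      List.getD_cons_zero, List.getD_cons_succ, decide_eq_true_eq, gt_iff_lt]
    split_ifs <;> push_cast <;> omega

theorem countA_eq_posC (b : List (List Int)) (h : Pre_solution b) :
    countA b = (posC b : Int) := by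
  obtain ⟨hl, hr⟩ := h
  match b, hl with
  | [r0, r1, r2, r3, r4], _ =>
    have h0 : r0.length = 5 := hr _ (by simp)
    have h1 : r1.length = 5 := hr _ (by simp)
    have h2 : r2.length = 5 := hr _ (by simp)
    have h3 : r3.length = 5 := hr _ (by simp)
    have h4 : r4.length = 5 := hr _ (by simp)
    have step : ∀ (F : Int → Int → Int) (a : Int),
        (PySem.List.pyRange 0 5 1).foldl F a = F (F (F (F (F a 0) 1) 2) 3) 4 := by
      intro F a
      rw [show PySem.List.pyRange 0 5 1 = ([0, 1, 2, 3, 4] : List Int) from by decide]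
      rfl
    rw [countA, step]
    simp only [getC, show ((0 : Int)).toNat = 0 from rfl, show ((1 : Int)).toNat = 1 from rfl,
      show ((2 : Int)).toNat = 2 from rfl, show ((3 : Int)).toNat = 3 from rfl,
      show ((4 : Int)).toNat = 4 from rfl, List.getD_cons_zero, List.getD_cons_succ]
    rw [row_count r0 h0, row_count r1 h1, row_count r2 h2, row_count r3 h3, row_count r4 h4]
    simp only [posC, countB, List.map_cons, List.map_nil, List.sum_cons, List.sum_nil]
    push_cast
    ring

-- ===== one iteration + the loops =====

theorem loop_eq (f : Nat) (b : List (List Int)) (h : Pre_solution b) :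
    countA (loopA f b) = (countB (loopB f b) : Int) := by
  induction f generalizing b with
  | zero =>
    simpa [posC] using countA_eq_posC b h
  | succ f ih =>
    cases hH : pairsH.find? (fun p => tripH b p.1 p.2) with
    | some p =>
      have hs1 : scanH (b, false) = (dfsA 30 b p.1 p.2 (getC b p.1 p.2), true) := by
        rw [scanH_eq, hH]
      have htr := List.find?_some hH
      have hc : getC b p.1 p.2 ≠ 0 := by
        simp only [tripH, decide_eq_true_eq] at htr
        exact htr.1
      have hsd : Pre_solution (dfsA 30 b p.1 p.2 (getC b p.1 p.2)) :=
        shape_dfsA 30 b p.1 p.2 _ h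
      have hscl := (shape_posC_cleanA _ hsd).1
      simp only [loopA, loopB, findTriple, hH, hs1, scanV_true, if_true]
      rw [floodB_eq_dfsA b p.1 p.2 _ h hc]
      exact ih _ hscl
    | none =>
      have hs1 : scanH (b, false) = (b, false) := by rw [scanH_eq, hH]
      cases hV : pairsV.find? (fun p => tripV b p.1 p.2) with
      | some p =>
        have hs2 : scanV (b, false) = (dfsA 30 b p.1 p.2 (getC b p.1 p.2), true) := by
          rw [scanV_eq, hV]
        have htr := List.find?_some hV
        have hc : getC b p.1 p.2 ≠ 0 := by
          simp only [tripV, decide_eq_true_eq] at htr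
          exact htr.1
        have hsd : Pre_solution (dfsA 30 b p.1 p.2 (getC b p.1 p.2)) :=
          shape_dfsA 30 b p.1 p.2 _ h
        have hscl := (shape_posC_cleanA _ hsd).1
        simp only [loopA, loopB, findTriple, hH, hV, hs1, hs2, if_true]
        rw [floodB_eq_dfsA b p.1 p.2 _ h hc]
        exact ih _ hscl
      | none =>
        have hs2 : scanV (b, false) = (b, false) := by rw [scanV_eq, hV]
        obtain ⟨hsc, hpc⟩ := shape_posC_cleanA b h
        simp only [loopA, loopB, findTriple, hH, hV, hs1, hs2, Bool.false_eq_true, if_false]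
        rw [countA_eq_posC _ hsc, hpc]
        rfl

-- ===== VERDICT (by name: the statement is the Claim_ definition above) =====
theorem solution_spec : Claim_equal_solution := by
  intro board _ hpre
  unfold Spec_solution solution solution_alt
  exact loop_eq 32 board hpre
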